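-- pv_equiv track=rewrite | github.com/Ratchet2277/advent-of-code | day-4/main.py | is_sub_matrix_x_mas
-- ===== SOURCE A (Python) =====
-- def is_sub_matrix_x_mas(sub_matrix: list[str]) -> bool:
--     if sub_matrix[1][1] != 'A':
--         return False
--
--     for orientation in range(4):
--         if orientation:
--             sub_matrix = rotate_matrix(sub_matrix)
--         if test_orientation(sub_matrix):
--             return True
--
--     return False
--
-- def test_orientation(sub_matrix: list[str]) -> bool:
--     match = 'MAS'
--
--     for i in range(3):
--         if sub_matrix[i][i] != match[i] or sub_matrix[2 - i][i] != match[i]: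
--             return False
--     return True
--
-- def rotate_matrix(lines: list[str]) -> list[str]:
--     output = list(zip(*lines[::-1]))
--
--     return [''.join(line) for line in output]
-- ===== SOURCE B (Python) =====
-- def is_sub_matrix_x_mas(sub_matrix: list[str]) -> bool:
--     # Closed-form check: center 'A', and each diagonal is one 'M' and one 'S'.
--     if sub_matrix[1][1] != 'A':
--         return False
--     tl, tr = sub_matrix[0][0], sub_matrix[0][2]
--     bl, br = sub_matrix[2][0], sub_matrix[2][2]
--     return tl + br in ('MS', 'SM') and tr + bl in ('MS', 'SM')
-- ===== Notes on version B (the rewrite author's own statement) =====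
-- stated objective: simpler
-- what changed: Replaced the 4-rotation loop with its two helpers (matrix rotation via zip-transpose and per-orientation diagonal scan) by a single closed-form boolean: center is 'A' and each diagonal holds one 'M' and one 'S'.
-- outside the precondition, e.g. on is_sub_matrix_x_mas(['AA', 'AA']): A returns False, B raises IndexError; on is_sub_matrix_x_mas(['MMMM', 'MAMM', 'SMSS']): A returns False, B returns True
import Mathlib
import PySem

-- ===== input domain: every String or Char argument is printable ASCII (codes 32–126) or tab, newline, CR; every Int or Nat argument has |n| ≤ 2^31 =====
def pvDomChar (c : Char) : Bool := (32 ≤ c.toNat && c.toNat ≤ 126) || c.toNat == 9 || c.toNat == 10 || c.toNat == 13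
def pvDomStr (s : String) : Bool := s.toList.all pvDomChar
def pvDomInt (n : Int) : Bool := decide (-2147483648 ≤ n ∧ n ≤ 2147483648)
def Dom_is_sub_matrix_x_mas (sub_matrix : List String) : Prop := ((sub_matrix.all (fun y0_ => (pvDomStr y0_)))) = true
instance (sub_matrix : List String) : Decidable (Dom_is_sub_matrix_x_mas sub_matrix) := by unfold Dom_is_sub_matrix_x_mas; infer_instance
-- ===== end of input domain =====

-- B replaces A's rotation loop and both helpers by a single closed-form check of the
-- center and the two diagonals (objective: simpler).

-- ===== PORT A =====
-- shared primitive: sub_matrix[i][j] for literal nonnegative i, j (none = IndexError)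
def pvCharAt (m : List String) (i j : Nat) : Option Char :=
  (m[i]?).bind (fun s => s.toList[j]?)

-- rotate_matrix: zip(*lines[::-1]) ported by hand as a min-length transpose
-- (exact: Python's zip truncates every column to the shortest row)
def pvRotate (lines : List String) : List String :=
  let rows := lines.reverse.map String.toList
  let n : Nat := match rows.map List.length with
    | [] => 0
    | x :: xs => xs.foldl min x
  (List.range n).map (fun i => String.ofList (rows.map (fun r => r.getD i ' ')))

-- test_orientation: checks sub_matrix[i][i] and sub_matrix[2-i][i] against 'MAS'
-- (an out-of-range read, none, counts as a mismatch; Pre_ keeps such inputs out)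
def pvTestOrientation (m : List String) : Bool :=
  (List.range 3).all (fun i =>
    pvCharAt m i i == some (['M','A','S'].getD i ' ')
      && pvCharAt m (2 - i) i == some (['M','A','S'].getD i ' '))

-- the 'for orientation in range(4)' loop: test, then rotate and repeat
def pvOrientLoop : List String → Nat → Bool
  | _, 0 => false
  | m, n + 1 => if pvTestOrientation m then true else pvOrientLoop (pvRotate m) n

def is_sub_matrix_x_mas (sub_matrix : List String) : Bool :=
  match pvCharAt sub_matrix 1 1 with
  | none => false   -- Python raises IndexError here; excluded by Pre_
  | some c => if c ≠ 'A' then false else pvOrientLoop sub_matrix 4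

-- ===== PORT B =====
-- tl + br in ('MS', 'SM')
def pvMasPair (a b : Option Char) : Bool :=
  (a == some 'M' && b == some 'S') || (a == some 'S' && b == some 'M')

def is_sub_matrix_x_mas_alt (sub_matrix : List String) : Bool :=
  match pvCharAt sub_matrix 1 1 with
  | none => false   -- Python raises IndexError here; excluded by Pre_
  | some c =>
    if c ≠ 'A' then false
    else pvMasPair (pvCharAt sub_matrix 0 0) (pvCharAt sub_matrix 2 2)
           && pvMasPair (pvCharAt sub_matrix 0 2) (pvCharAt sub_matrix 2 0)

-- ===== PRECONDITION & SPEC =====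
-- Pre_ excludes inputs where A raises IndexError (no element at [1][1]) and
-- non-3x3 inputs whose center char is 'A', on which A's value is an accident of
-- zip's truncation of ragged rows (there A may raise, or return a value B's
-- 3x3 corner reads cannot be expected to match; B may also raise).
def Pre_is_sub_matrix_x_mas (sub_matrix : List String) : Prop :=
  (pvCharAt sub_matrix 1 1).isSome = true ∧
  (pvCharAt sub_matrix 1 1 = some 'A' →
    sub_matrix.length = 3 ∧ ∀ s ∈ sub_matrix, s.toList.length = 3)
instance (sub_matrix : List String) : Decidable (Pre_is_sub_matrix_x_mas sub_matrix) := by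
  unfold Pre_is_sub_matrix_x_mas; infer_instance

def pvWitness_is_sub_matrix_x_mas : List String := ["MAS", "MAS", "MAS"]

def Spec_is_sub_matrix_x_mas (sub_matrix : List String) (out : Bool) : Prop := out = is_sub_matrix_x_mas_alt sub_matrix
instance (sub_matrix : List String) (out : Bool) : Decidable (Spec_is_sub_matrix_x_mas sub_matrix out) := by unfold Spec_is_sub_matrix_x_mas; infer_instance

-- ===== CLAIM (what is proved, stated in full; the proofs are below) =====
def Claim_equal_is_sub_matrix_x_mas : Prop := ∀ (sub_matrix : List String), Dom_is_sub_matrix_x_mas sub_matrix → Pre_is_sub_matrix_x_mas sub_matrix → Spec_is_sub_matrix_x_mas sub_matrix (is_sub_matrix_x_mas sub_matrix)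

-- ===== LEMMAS AND PROOFS =====

-- On a concrete 3x3 matrix with center 'A', A's 4-orientation loop equals B's
-- closed-form diagonal check.
lemma pvOrientLoop_succ (m : List String) (n : Nat) :
    pvOrientLoop m (n + 1) = (pvTestOrientation m || pvOrientLoop (pvRotate m) n) := by
  simp [pvOrientLoop]

lemma pvOrientLoop_zero (m : List String) : pvOrientLoop m 0 = false := rfl

-- one 90-degree rotation of a concrete 3x3 matrix
lemma pv_rot (a b c d e f g h i : Char) :
    pvRotate [String.ofList [a, b, c], String.ofList [d, e, f], String.ofList [g, h, i]]
      = [String.ofList [g, d, a], String.ofList [h, e, b], String.ofList [i, f, c]] := by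
  simp only [pvRotate, List.reverse_cons, List.reverse_nil, List.nil_append, List.cons_append,
    List.map_cons, List.map_nil, String.toList_ofList, List.length_cons, List.length_nil]
  norm_num [List.range_succ]

set_option maxHeartbeats 4000000 in
lemma pv_key (a b c d f g h i : Char) :
    pvOrientLoop [String.ofList [a, b, c], String.ofList [d, 'A', f], String.ofList [g, h, i]] 4
      = (pvMasPair (some a) (some i) && pvMasPair (some c) (some g)) := by
  rw [show (4 : Nat) = 3 + 1 from rfl, pvOrientLoop_succ, pv_rot,
      show (3 : Nat) = 2 + 1 from rfl, pvOrientLoop_succ, pv_rot,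
      show (2 : Nat) = 1 + 1 from rfl, pvOrientLoop_succ, pv_rot,
      show (1 : Nat) = 0 + 1 from rfl, pvOrientLoop_succ, pvOrientLoop_zero]
  simp [pvTestOrientation, pvCharAt, pvMasPair, List.range_succ]
  -- the remaining goal is a purely propositional identity over the corner equalities
  rw [Bool.eq_iff_iff]
  simp only [Bool.or_eq_true, Bool.and_eq_true, beq_iff_eq]
  tauto

-- ===== VERDICT (by name: the statement is the Claim_ definition above) =====
theorem is_sub_matrix_x_mas_spec : Claim_equal_is_sub_matrix_x_mas := by
  intro m _hdom hpre
  unfold Spec_is_sub_matrix_x_mas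
  obtain ⟨hsome, hA⟩ := hpre
  rcases hc : pvCharAt m 1 1 with _ | c
  · rw [hc] at hsome; simp at hsome
  · by_cases hcA : c = 'A'
    · subst hcA
      obtain ⟨hlen, hrows⟩ := hA hc
      obtain ⟨s0, s1, s2, rfl⟩ := List.length_eq_three.mp hlen
      obtain ⟨a, b, cc, h0⟩ := List.length_eq_three.mp (hrows s0 (by simp))
      obtain ⟨d, e, f, h1⟩ := List.length_eq_three.mp (hrows s1 (by simp))
      obtain ⟨g, hh, ii, h2⟩ := List.length_eq_three.mp (hrows s2 (by simp))
      have e0 : s0 = String.ofList [a, b, cc] := by rw [← h0, String.ofList_toList]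
      have e1 : s1 = String.ofList [d, e, f] := by rw [← h1, String.ofList_toList]
      have e2 : s2 = String.ofList [g, hh, ii] := by rw [← h2, String.ofList_toList]
      subst e0 e1 e2
      have he : e = 'A' := by
        simpa [pvCharAt] using hc
      subst he
      simp only [is_sub_matrix_x_mas, is_sub_matrix_x_mas_alt, hc]
      simp [pv_key, pvCharAt]
    · simp [is_sub_matrix_x_mas, is_sub_matrix_x_mas_alt, hc, hcA]
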